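-- pv_equiv track=rewrite | github.com/lanl/T-ELF | TELF/applications/Cheetah/cheetah.py | add_with_union_of_others
-- ===== SOURCE A (Python) =====
-- def add_with_union_of_others(d, s, key):
--     """
--     Compute the addition of a set associated with a given key and the union of all other sets in a dictionary.
--
--     Parameters:
--     -----------
--     d: dict
--         A dictionary where keys are strings and values are sets.
--     s: set
--         The set (associated with key) to be added to
--     key: str
--         The key in the dictionary whose set is to be modified with the union of all other sets.
--
--     Returns:
--     --------
--     set:
--         The intersection set of the specified key's set and the union of all other sets in the dictionary.
--
--     Raises:
--     -------
--     ValueError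
--         If the specified key is not found in the dictionary.
--     """
--     if key not in d:
--         raise ValueError(f'Key {key!r} not found in the dictionary!')
--
--     # dont do anything if dict only contains target key
--     if len(d) == 1 and key in d:
--         return s
--     else:
--
--         # create union of all sets (excluding the set for key)
--         union_set = set.union(*(other_set for other_key, other_set in d.items() if other_key != key))
--
--         # create the modified set
--         s_updated = d[key].copy()
--         s_updated.update(s & union_set)
--         return s_updated
-- ===== SOURCE B (Python) =====
-- def add_with_union_of_others(d, s, key):
--     base = d.get(key)
--     if base is None:
--         raise ValueError(f'Key {key!r} not found in the dictionary!')
--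
--     # dict only contains the target key: nothing to add
--     if len(d) == 1:
--         return s
--
--     # collect the other sets once, then scan each element of s against them:
--     # no union set is ever materialized
--     others = [v for k, v in d.items() if k != key]
--     result = base.copy()
--     for x in s:
--         if any(x in o for o in others):
--             result.add(x)
--     return result
-- ===== Notes on version B (the rewrite author's own statement) =====
-- stated objective: alternative
-- what changed: Instead of materializing the union of all other sets and intersecting it with s, B looks the key up once with d.get, collects the other sets, and scans each element of s, adding it to a copy of d[key] iff some other set contains it; no union set is built.
import Mathlib
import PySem

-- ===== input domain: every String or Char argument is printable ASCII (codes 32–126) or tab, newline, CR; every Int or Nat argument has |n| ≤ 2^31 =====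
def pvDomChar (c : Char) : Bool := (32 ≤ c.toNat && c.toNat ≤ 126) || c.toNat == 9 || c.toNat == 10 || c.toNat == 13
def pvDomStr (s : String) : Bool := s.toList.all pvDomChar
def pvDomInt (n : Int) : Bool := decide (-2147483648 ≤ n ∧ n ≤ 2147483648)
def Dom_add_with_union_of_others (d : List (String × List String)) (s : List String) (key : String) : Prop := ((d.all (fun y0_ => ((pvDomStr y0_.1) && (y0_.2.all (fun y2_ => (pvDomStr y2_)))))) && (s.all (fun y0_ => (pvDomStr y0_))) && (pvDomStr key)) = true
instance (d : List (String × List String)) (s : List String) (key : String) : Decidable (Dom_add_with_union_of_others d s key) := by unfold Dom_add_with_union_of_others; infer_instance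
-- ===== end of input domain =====

-- B looks the key up once, collects the other sets, and scans each element of s against
-- them (alternative decomposition; no union set is materialized).


-- ===== PORT A =====
-- union of the other sets, then d[key].copy() updated with s & union
def add_with_union_of_others (d : List (String × List String)) (s : List String) (key : String) : List String :=
  let dd := PySem.Dict.mk d
  if dd.contains key = false then []  -- Python raises ValueError here; excluded by Pre_
  else if dd.size = 1 && dd.contains key then s
  else
    let union_set :=
      (dd.items.filter (fun p => p.1 != key)).foldl
        (fun acc p => PySem.Set.union acc p.2) PySem.Set.empty
    PySem.Set.update (dd.getD key []) (PySem.Set.inter s union_set)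

-- ===== PORT B =====
-- 'others = [v for k, v in d.items() if k != key]'
def pvOthers (items : List (String × List String)) (key : String) : List (List String) :=
  items.filterMap (fun p => if p.1 == key then none else some p.2)

-- d.get(key) once, then a per-element scan of s against the other sets
def add_with_union_of_others_alt (d : List (String × List String)) (s : List String) (key : String) : List String :=
  match (PySem.Dict.mk d).get? key with
  | none => []  -- Python raises ValueError here; excluded by Pre_
  | some base =>
    if (PySem.Dict.mk d).items.length == 1 then s
    else
      let others := pvOthers (PySem.Dict.mk d).items key
      s.foldl
        (fun result x =>
          if others.any (fun o => PySem.Set.contains o x)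
          then PySem.Set.add result x else result)
        base

-- ===== PRECONDITION & SPEC =====
-- Pre_ excludes exactly the inputs where Python A raises ValueError (key not in d).
def Pre_add_with_union_of_others (d : List (String × List String)) (s : List String) (key : String) : Prop :=
  (PySem.Dict.mk d).contains key = true
instance (d : List (String × List String)) (s : List String) (key : String) : Decidable (Pre_add_with_union_of_others d s key) := by unfold Pre_add_with_union_of_others; infer_instance

def pvWitness_add_with_union_of_others : (List (String × List String)) × List String × String :=
  ([("a", ["x", "y"]), ("b", ["y", "z"])], ["y", "w"], "a")

def Spec_add_with_union_of_others (d : List (String × List String)) (s : List String) (key : String) (out : List String) : Prop := out = add_with_union_of_others_alt d s key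
instance (d : List (String × List String)) (s : List String) (key : String) (out : List String) : Decidable (Spec_add_with_union_of_others d s key out) := by unfold Spec_add_with_union_of_others; infer_instance

-- ===== CLAIM (what is proved, stated in full; the proofs are below) =====
def Claim_equal_add_with_union_of_others : Prop := ∀ (d : List (String × List String)) (s : List String) (key : String), Dom_add_with_union_of_others d s key → Pre_add_with_union_of_others d s key → Spec_add_with_union_of_others d s key (add_with_union_of_others d s key)

-- ===== LEMMAS AND PROOFS =====

-- membership in a left fold of set unions over the second components
theorem mem_foldl_union {α β : Type} [BEq α] [LawfulBEq α]
    (l : List (β × List α)) (init : PySem.Set α) (x : α) :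
    x ∈ l.foldl (fun acc p => PySem.Set.union acc p.2) init ↔
      x ∈ init ∨ ∃ p ∈ l, x ∈ p.2 := by
  induction l generalizing init with
  | nil => simp
  | cons p l ih =>
    simp only [List.foldl_cons, ih, PySem.Set.mem_union, List.mem_cons]
    constructor
    · rintro ((h | h) | ⟨q, hq, hx⟩)
      · exact Or.inl h
      · exact Or.inr ⟨p, Or.inl rfl, h⟩
      · exact Or.inr ⟨q, Or.inr hq, hx⟩
    · rintro (h | ⟨q, (rfl | hq), hx⟩)
      · exact Or.inl (Or.inl h)
      · exact Or.inl (Or.inr hx)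
      · exact Or.inr ⟨q, hq, hx⟩

-- A's membership test in the union set equals B's any-scan over the other sets
theorem contains_union_eq_any (items : List (String × List String)) (key : String) (x : String) :
    PySem.Set.contains
      ((items.filter (fun p => p.1 != key)).foldl
        (fun acc p => PySem.Set.union acc p.2) PySem.Set.empty) x
      = (pvOthers items key).any (fun o => PySem.Set.contains o x) := by
  apply Bool.eq_iff_iff.mpr
  rw [PySem.Set.contains_iff, mem_foldl_union]
  simp only [pvOthers, List.any_eq_true, List.mem_filterMap, List.mem_filter,
    PySem.Set.empty, List.not_mem_nil, false_or, PySem.Set.contains_iff, bne_iff_ne]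
  constructor
  · rintro ⟨p, ⟨hp, hne⟩, hx⟩
    exact ⟨p.2, ⟨p, hp, by simp [beq_iff_eq] at hne ⊢; exact hne⟩, hx⟩
  · rintro ⟨o, ⟨p, hp, ho⟩, hx⟩
    by_cases h : p.1 = key
    · simp [h] at ho
    · simp [h] at ho
      exact ⟨p, ⟨hp, by simpa using h⟩, ho ▸ hx⟩

-- ===== VERDICT (by name: the statement is the Claim_ definition above) =====
theorem add_with_union_of_others_spec : Claim_equal_add_with_union_of_others := by
  intro d s key _ hpre
  unfold Spec_add_with_union_of_others add_with_union_of_others add_with_union_of_others_alt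
  unfold Pre_add_with_union_of_others at hpre
  have hsome : ((PySem.Dict.mk d).get? key).isSome := by
    rw [← PySem.Dict.contains_eq_isSome_get?, hpre]
  obtain ⟨base, hget⟩ := Option.isSome_iff_exists.mp hsome
  simp only [hpre, Bool.true_eq_false, Bool.and_true, if_false, hget]
  by_cases hsize : (PySem.Dict.mk d).size = 1
  · simp [PySem.Dict.size] at hsize ⊢
    simp [hsize]
  · have hlen : ((PySem.Dict.mk d).items.length == 1) = false := by
      simpa [PySem.Dict.size] using hsize
    simp only [hsize, decide_false, Bool.false_eq_true, if_false, hlen]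
    have hbase : (PySem.Dict.mk d).getD key [] = base :=
      PySem.Dict.getD_of_get?_eq_some _ _ hget
    rw [hbase, PySem.Set.update, PySem.Set.inter, ← PySem.List.foldl_if_eq_foldl_filter]
    simp only [contains_union_eq_any]
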